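-- pv_equiv track=rewrite | github.com/Kasiet2001/leetcode | count_submatrices_with_top_left_element.py | countSubmatrices
-- ===== SOURCE A (Python) =====
-- def countSubmatrices(grid, k):
--     ans = 0
--     row = len(grid)
--     column = len(grid[0])
--     prev_sum = [0] * column
--     for i in range(row):
--         curr = 0
--         for j in range(column):
--             curr += grid[i][j]
--             prev_sum[j] += curr
--             if prev_sum[j] <= k:
--                 ans += 1
--             else:
--                 break
--     return ans
-- ===== SOURCE B (Python) =====
-- def countSubmatrices(grid, k):
--     # Column-major sweep: walk the matrix one column at a time, keeping only the
--     # rows whose running submatrix total is still within budget; each surviving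
--     # row carries its running row sum and is consumed from the front.
--     ans = 0
--     alive = [(0, row) for row in grid]
--     for _ in range(len(grid[0])):
--         total = 0
--         survivors = []
--         for acc, row in alive:
--             acc += row[0]
--             total += acc
--             if total <= k:
--                 ans += 1
--                 survivors.append((acc, row[1:]))
--         alive = survivors
--     return ans
-- ===== Notes on version B (the rewrite author's own statement) =====
-- stated objective: alternative
-- what changed: Transposes the traversal: instead of A's row-major sweep carrying per-column running totals with an inner break, B sweeps column by column over a shrinking list of still-affordable rows, each carrying its own running row sum, dropping a row the moment its submatrix total exceeds k; Pre_ excludes empty grids (A raises IndexError on len(grid[0])) and grids with a row shorter than len(grid[0]), where A raises IndexError unless a break happens first.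
-- outside the precondition, e.g. on countSubmatrices([[0, 0], [5]], 0): A returns 2, B returns 2
import Mathlib
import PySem

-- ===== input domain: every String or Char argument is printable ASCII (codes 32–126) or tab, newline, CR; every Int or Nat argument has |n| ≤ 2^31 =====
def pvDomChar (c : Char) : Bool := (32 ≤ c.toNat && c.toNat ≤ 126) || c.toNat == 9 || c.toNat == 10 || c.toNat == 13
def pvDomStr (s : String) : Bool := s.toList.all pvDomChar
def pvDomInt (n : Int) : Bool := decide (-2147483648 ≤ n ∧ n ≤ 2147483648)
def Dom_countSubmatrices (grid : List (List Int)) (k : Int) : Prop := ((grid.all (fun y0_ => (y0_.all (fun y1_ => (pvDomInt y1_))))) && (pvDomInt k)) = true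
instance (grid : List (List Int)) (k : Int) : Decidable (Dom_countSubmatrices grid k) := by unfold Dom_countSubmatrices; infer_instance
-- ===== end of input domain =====

-- B replaces A's row-major sweep (rolling per-column totals, inner break) by a
-- column-major sweep over a shrinking list of still-affordable rows; objective: alternative.

-- ===== PORT A =====
-- inner 'for j in range(column)' loop with its break: state (ans, prev_sum), local curr
def innerA (gi : List Int) (k : Int) : List Int → Int → Int × Int → List Int → Int × List Int
  | [], _curr, st, prev => (st.1, prev)
  | j :: js, curr, st, prev =>
    let curr' := curr + PySem.List.pyGetD gi j 0
    let pj := PySem.List.pyGetD prev j 0 + curr'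
    let prev' := PySem.List.pySetD prev j pj
    if pj ≤ k then innerA gi k js curr' (st.1 + 1, st.2) prev'
    else (st.1, prev')

def countSubmatrices (grid : List (List Int)) (k : Int) : Int :=
  let row : Int := (grid.length : Int)
  let column : Nat := (PySem.List.pyGetD grid 0 []).length   -- len(grid[0]); grid ≠ [] by Pre_
  let init : Int × List Int := (0, List.replicate column (0 : Int))
  ((PySem.List.pyRange 0 row 1).foldl
    (fun st i =>
      innerA (PySem.List.pyGetD grid i []) k (PySem.List.pyRange 0 (column : Int) 1) 0 (st.1, 0) st.2)
    init).1

-- ===== PORT B =====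
-- one column of B: inner 'for acc, row in alive' loop; returns (count this column, survivors)
def colPass (k : Int) : Int → List (Int × List Int) → Int × List (Int × List Int)
  | _, [] => (0, [])
  | s, pr :: rest =>
    let acc' := pr.1 + PySem.List.pyGetD pr.2 0 0            -- row[0]; IndexError excluded by Pre_
    let s' := s + acc'
    if s' ≤ k then
      let r := colPass k s' rest
      (r.1 + 1, (acc', PySem.List.slice pr.2 (some 1) none) :: r.2)   -- row[1:]
    else colPass k s' rest

def countSubmatrices_alt (grid : List (List Int)) (k : Int) : Int :=
  let alive0 : List (Int × List Int) := grid.map (fun r => ((0 : Int), r))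
  ((PySem.List.pyRange 0 (((grid.headD []).length : Nat) : Int) 1).foldl
    (fun st _ => ((st.1 + (colPass k 0 st.2).1, (colPass k 0 st.2).2) : Int × List (Int × List Int)))
    ((0 : Int), alive0)).1

-- ===== PRECONDITION & SPEC =====
-- Pre_ restricts to nonempty grids whose rows all have at least len(grid[0]) entries: on [] A's
-- len(grid[0]) raises IndexError, and a shorter row makes grid[i][j] raise IndexError unless a
-- break happens to occur first (a value-dependent accident; one such returning input is cited).
def Pre_countSubmatrices (grid : List (List Int)) (k : Int) : Prop :=
  grid ≠ [] ∧ ∀ r ∈ grid, (grid.headD []).length ≤ r.length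

instance (grid : List (List Int)) (k : Int) : Decidable (Pre_countSubmatrices grid k) := by
  unfold Pre_countSubmatrices; infer_instance

def pvWitness_countSubmatrices : List (List Int) × Int := ([[1, 2], [3, -4]], 3)

def Spec_countSubmatrices (grid : List (List Int)) (k : Int) (out : Int) : Prop := out = countSubmatrices_alt grid k
instance (grid : List (List Int)) (k : Int) (out : Int) : Decidable (Spec_countSubmatrices grid k out) := by unfold Spec_countSubmatrices; infer_instance

-- ===== CLAIM (what is proved, stated in full; the proofs are below) =====
def Claim_equal_countSubmatrices : Prop := ∀ (grid : List (List Int)) (k : Int), Dom_countSubmatrices grid k → Pre_countSubmatrices grid k → Spec_countSubmatrices grid k (countSubmatrices grid k)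

-- ===== LEMMAS AND PROOFS =====

-- pure list-level form of A's inner loop: walk the row suffix gs against the prev suffix ps
def innerL (k curr : Int) : List Int → List Int → Int × List Int
  | g :: gs, p :: ps =>
    let pj := p + (curr + g)
    if pj ≤ k then
      let r := innerL k (curr + g) gs ps
      (r.1 + 1, pj :: r.2)
    else (0, pj :: ps)
  | _, ps => (0, ps)

theorem innerL_len (k : Int) : ∀ (gs ps : List Int) (curr : Int),
    (innerL k curr gs ps).2.length = ps.length := by
  intro gs
  induction gs with
  | nil => intro ps curr; simp [innerL]
  | cons g gs ih =>
    intro ps curr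
    cases ps with
    | nil => simp [innerL]
    | cons p ps =>
      simp only [innerL]
      split
      · simp [ih]
      · simp

theorem set_append_middle (pre : List Int) (p v : Int) (ps : List Int) :
    (pre ++ p :: ps).set pre.length v = pre ++ v :: ps := by
  induction pre with
  | nil => simp
  | cons a pre ih => simp [ih]

-- A's indexed inner loop equals innerL on the suffixes
theorem innerA_eq (k : Int) : ∀ (ps gs gp pre : List Int) (curr ans : Int),
    gp.length = pre.length → ps.length ≤ gs.length →
    innerA (gp ++ gs) k (PySem.List.pyRange (pre.length : Int) ((pre.length : Int) + (ps.length : Int)) 1)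
      curr (ans, 0) (pre ++ ps) =
      (ans + (innerL k curr (gs.take ps.length) ps).1, pre ++ (innerL k curr (gs.take ps.length) ps).2) := by
  intro ps
  induction ps with
  | nil =>
    intro gs gp pre curr ans hlen hle
    rw [PySem.List.pyRange_one_eq_nil (by simp)]
    simp [innerA, innerL]
  | cons p ps ih =>
    intro gs gp pre curr ans hlen hle
    cases gs with
    | nil => simp at hle
    | cons g gs =>
      have hcons : PySem.List.pyRange (pre.length : Int) ((pre.length : Int) + ((p :: ps).length : Int)) 1
          = (pre.length : Int) :: PySem.List.pyRange ((pre.length : Int) + 1) ((pre.length : Int) + ((p :: ps).length : Int)) 1 := by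
        apply PySem.List.pyRange_one_cons
        simp
      rw [hcons]
      simp only [innerA]
      have hg : PySem.List.pyGetD (gp ++ g :: gs) (pre.length : Int) 0 = g := by
        rw [PySem.List.pyGetD_natCast]
        rw [← hlen]
        simp
      have hp : PySem.List.pyGetD (pre ++ p :: ps) (pre.length : Int) 0 = p := by
        rw [PySem.List.pyGetD_natCast]
        simp
      have hset : PySem.List.pySetD (pre ++ p :: ps) (pre.length : Int) (p + (curr + g))
          = pre ++ (p + (curr + g)) :: ps := by
        rw [PySem.List.pySetD_natCast, set_append_middle]
      rw [hg, hp, hset]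
      simp only [List.length_cons, List.take_succ_cons, innerL]
      by_cases hcmp : p + (curr + g) ≤ k
      · rw [if_pos hcmp, if_pos hcmp]
        have hih := ih gs (gp ++ [g]) (pre ++ [p + (curr + g)]) (curr + g) (ans + 1)
          (by simp [hlen]) (by simpa using hle)
        have e2 : (((pre ++ [p + (curr + g)]).length : Nat) : Int) + (ps.length : Int)
            = (pre.length : Int) + ((ps.length + 1 : Nat) : Int) := by simp; omega
        have e1 : (((pre ++ [p + (curr + g)]).length : Nat) : Int) = (pre.length : Int) + 1 := by
          simp
        rw [e2, e1] at hih
        rw [show (gp ++ [g]) ++ gs = gp ++ g :: gs by simp,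
            show (pre ++ [p + (curr + g)]) ++ ps = pre ++ (p + (curr + g)) :: ps by simp] at hih
        rw [hih]
        simp only [Prod.mk.injEq]
        constructor
        · ring
        · simp
      · rw [if_neg hcmp, if_neg hcmp]
        simp

-- innerL only looks at the first |ps| entries of the row
theorem innerL_take (k : Int) : ∀ (ps gs : List Int) (curr : Int),
    innerL k curr (gs.take ps.length) ps = innerL k curr gs ps := by
  intro ps
  induction ps with
  | nil => intro gs curr; cases gs.take 0 <;> cases gs <;> simp [innerL]
  | cons p ps ih =>
    intro gs curr
    cases gs with
    | nil => simp
    | cons g gs =>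
      simp only [List.length_cons, List.take_succ_cons, innerL]
      rw [ih]

-- A as a pure fold over (curr, row) pairs against the carried column sums
def FoldA (k : Int) : List (Int × List Int) → List Int → Int × List Int
  | [], prev => (0, prev)
  | pr :: rest, prev =>
    let r := innerL k pr.1 pr.2 prev
    let s := FoldA k rest r.2
    (r.1 + s.1, s.2)

theorem foldA_eq (k : Int) (column : Nat) : ∀ (rows : List (List Int)) (ans : Int) (prev : List Int),
    prev.length = column → (∀ r ∈ rows, column ≤ r.length) →
    rows.foldl (fun st gi => innerA gi k (PySem.List.pyRange 0 (column : Int) 1) 0 (st.1, 0) st.2) (ans, prev)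
      = (ans + (FoldA k (rows.map (fun r => ((0 : Int), r))) prev).1,
         (FoldA k (rows.map (fun r => ((0 : Int), r))) prev).2) := by
  intro rows
  induction rows with
  | nil => intro ans prev _ _; simp [FoldA]
  | cons g rows ih =>
    intro ans prev hprev hall
    simp only [List.foldl_cons, List.map_cons]
    have hA := innerA_eq k prev g [] [] 0 ans rfl (by rw [hprev]; exact hall g (by simp))
    simp only [List.length_nil, Nat.cast_zero, List.nil_append, zero_add] at hA
    rw [innerL_take] at hA
    rw [hprev] at hA
    rw [hA]
    rw [ih (ans + (innerL k 0 g prev).1) (innerL k 0 g prev).2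
      (by rw [innerL_len]; exact hprev) (fun r hr => hall r (List.mem_cons_of_mem _ hr))]
    simp only [FoldA, Prod.mk.injEq]
    exact ⟨by ring, trivial⟩

-- peel one column: A's pure fold on prev = p :: ps equals one colPass plus the fold on ps
theorem peel (k : Int) : ∀ (pairs : List (Int × List Int)) (p : Int) (ps : List Int),
    (∀ pr ∈ pairs, ps.length + 1 ≤ pr.2.length) →
    (FoldA k pairs (p :: ps)).1
      = (colPass k p pairs).1 + (FoldA k (colPass k p pairs).2 ps).1 := by
  intro pairs
  induction pairs with
  | nil => intro p ps _; simp [FoldA, colPass]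
  | cons pr rest ih =>
    intro p ps hall
    obtain ⟨c, g⟩ := pr
    cases g with
    | nil =>
      have := hall (c, []) (by simp)
      simp at this
    | cons g0 gs =>
      simp only [FoldA, colPass, innerL, PySem.List.pyGetD_zero_cons, PySem.List.slice_from_one,
        List.tail_cons]
      by_cases h : p + (c + g0) ≤ k
      · rw [if_pos h, if_pos h]
        have hlen := innerL_len k gs ps (c + g0)
        have hrest : ∀ pr ∈ rest, (innerL k (c + g0) gs ps).2.length + 1 ≤ pr.2.length := by
          intro pr hpr; rw [hlen]; exact hall pr (List.mem_cons_of_mem _ hpr)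
        have hih := ih (p + (c + g0)) (innerL k (c + g0) gs ps).2 hrest
        simp only [FoldA] at ⊢
        rw [hih]
        ring
      · rw [if_neg h, if_neg h]
        have hih := ih (p + (c + g0)) ps (fun pr hpr => hall pr (List.mem_cons_of_mem _ hpr))
        rw [hih]
        ring

theorem colPass_len (k : Int) : ∀ (pairs : List (Int × List Int)) (s : Int) (n : Nat),
    (∀ pr ∈ pairs, n + 1 ≤ pr.2.length) →
    ∀ pr' ∈ (colPass k s pairs).2, n ≤ pr'.2.length := by
  intro pairs
  induction pairs with
  | nil => intro s n _ pr' h; simp [colPass] at h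
  | cons pr rest ih =>
    intro s n hall pr' h
    simp only [colPass] at h
    split at h
    · rcases List.mem_cons.mp h with h1 | h1
      · subst h1
        have := hall pr (by simp)
        cases hg : pr.2 with
        | nil => simp [hg] at this
        | cons g0 gs =>
          simp only [PySem.List.slice_from_one, List.tail_cons]
          have : n + 1 ≤ (g0 :: gs).length := by rw [← hg]; exact hall pr (by simp)
          simp at this ⊢
          omega
      · exact ih _ n (fun q hq => hall q (List.mem_cons_of_mem _ hq)) pr' h1
    · exact ih _ n (fun q hq => hall q (List.mem_cons_of_mem _ hq)) pr' h

theorem foldA_nil_prev (k : Int) : ∀ (pairs : List (Int × List Int)),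
    (FoldA k pairs []).1 = 0 := by
  intro pairs
  induction pairs with
  | nil => simp [FoldA]
  | cons pr rest ih =>
    have h2 : innerL k pr.1 pr.2 [] = (0, []) := by cases pr.2 <;> simp [innerL]
    simp [FoldA, h2, ih]

-- B's column loop equals the pure fold on all-zero carried sums
theorem bridge (k : Int) : ∀ (l : List Int) (pairs : List (Int × List Int)) (ans : Int),
    (∀ pr ∈ pairs, l.length ≤ pr.2.length) →
    (l.foldl (fun st _ => ((st.1 + (colPass k 0 st.2).1, (colPass k 0 st.2).2) : Int × List (Int × List Int)))
        (ans, pairs)).1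
      = ans + (FoldA k pairs (List.replicate l.length 0)).1 := by
  intro l
  induction l with
  | nil => intro pairs ans _; simp [foldA_nil_prev]
  | cons x l ih =>
    intro pairs ans hall
    simp only [List.foldl_cons, List.length_cons, List.replicate_succ]
    rw [ih _ _ (colPass_len k pairs 0 l.length (by intro pr h; simpa using hall pr h))]
    rw [peel k pairs 0 (List.replicate l.length 0)
      (by intro pr h; simpa using hall pr h)]
    ring

-- ===== VERDICT (by name: the statement is the Claim_ definition above) =====
theorem countSubmatrices_spec : Claim_equal_countSubmatrices := by
  intro grid k _dom hpre
  obtain ⟨hne, hrows⟩ := hpre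
  unfold Spec_countSubmatrices countSubmatrices countSubmatrices_alt
  cases grid with
  | nil => exact absurd rfl hne
  | cons g0 rest =>
    simp only [List.headD_cons]
    have hg0 : PySem.List.pyGetD (g0 :: rest) (0 : Int) [] = g0 := by
      simp [PySem.List.pyGetD_zero_cons]
    rw [hg0]
    rw [PySem.List.foldl_pyRange_zero_pyGetD' (g0 :: rest) []
      (fun st gi => innerA gi k (PySem.List.pyRange 0 ((g0.length : Nat) : Int) 1) 0 (st.1, 0) st.2)
      (0, List.replicate g0.length (0 : Int))]
    rw [foldA_eq k g0.length (g0 :: rest) 0 (List.replicate g0.length 0) (by simp)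
      (by intro r hr; simpa using hrows r hr)]
    have hlen : (PySem.List.pyRange 0 ((g0.length : Nat) : Int) 1).length = g0.length := by
      rw [PySem.List.length_pyRange_one]; simp
    rw [bridge k (PySem.List.pyRange 0 ((g0.length : Nat) : Int) 1)
      (List.map (fun r => ((0 : Int), r)) (g0 :: rest)) 0
      (by intro pr hpr; rw [hlen]
          obtain ⟨r, hr, rfl⟩ := List.mem_map.mp hpr
          simpa using hrows r (by simpa using hr))]
    rw [hlen]
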